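-- pv_equiv track=rewrite | github.com/gurusharan3107/autonomous-agent-builder | src/autonomous_agent_builder/knowledge/maintained_freshness.py | matched_changed_paths
-- ===== SOURCE A (Python) =====
-- def matched_changed_paths(owned_paths: list[str], changed_paths: list[str]) -> list[str]:
--     matches: list[str] = []
--     for changed_path in changed_paths:
--         for owned_path in owned_paths:
--             if changed_path == owned_path or changed_path.startswith(f"{owned_path}/"):
--                 matches.append(changed_path)
--                 break
--     return sorted(set(matches))
-- ===== SOURCE B (Python) =====
-- def matched_changed_paths(owned_paths: list[str], changed_paths: list[str]) -> list[str]: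
--     # Index owned paths in a set once; for each changed path, walk its characters
--     # and test each '/'-boundary prefix (and the whole path) against the set,
--     # instead of scanning the owned list per changed path.
--     owned = set(owned_paths)
--
--     def hits(cp: str) -> bool:
--         buf = []
--         for ch in cp:
--             if ch == '/' and ''.join(buf) in owned:
--                 return True
--             buf.append(ch)
--         return cp in owned
--
--     return sorted(set(cp for cp in changed_paths if hits(cp)))
-- ===== Notes on version B (the rewrite author's own statement) =====
-- stated objective: faster
-- what changed: Instead of scanning the owned list for every changed path, B builds a set of owned paths once and checks each changed path's '/'-boundary prefixes (and the path itself) for membership in that set.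
import Mathlib
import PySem

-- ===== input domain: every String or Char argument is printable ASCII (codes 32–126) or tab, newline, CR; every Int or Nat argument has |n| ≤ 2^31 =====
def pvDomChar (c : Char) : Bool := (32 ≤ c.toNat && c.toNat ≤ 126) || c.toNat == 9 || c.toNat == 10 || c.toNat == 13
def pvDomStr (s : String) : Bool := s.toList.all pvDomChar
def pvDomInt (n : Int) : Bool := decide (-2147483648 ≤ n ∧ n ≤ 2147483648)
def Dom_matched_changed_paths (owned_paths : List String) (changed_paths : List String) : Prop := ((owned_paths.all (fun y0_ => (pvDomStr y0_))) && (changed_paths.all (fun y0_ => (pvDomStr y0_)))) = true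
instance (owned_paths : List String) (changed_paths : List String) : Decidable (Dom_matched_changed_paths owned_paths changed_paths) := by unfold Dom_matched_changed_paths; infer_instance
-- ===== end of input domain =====

-- B replaces A's per-changed-path scan of the owned list by one owned-paths set
-- and a character walk testing each '/'-boundary prefix for membership (faster).

-- ===== PORT A =====
-- inner 'for owned_path in owned_paths: … break' loop: true iff some owned path matched
def pvAInner (changed_path : String) : List String → Bool
  | [] => false
  | owned_path :: rest =>
    if changed_path == owned_path
        || PySem.Str.startswith changed_path (owned_path ++ "/") then true
    else pvAInner changed_path rest

def matched_changed_paths (owned_paths : List String) (changed_paths : List String) : List String :=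
  let pymatches : List String :=
    changed_paths.foldl (fun acc changed_path =>
      if pvAInner changed_path owned_paths then acc ++ [changed_path] else acc) []
  PySem.List.sorted (PySem.Set.ofList pymatches) (fun x => x) false

-- ===== PORT B =====
-- the 'for ch in cp' loop of Source B's hits: buf is the accumulated prefix
def pvBLoop (owned : PySem.Set String) (cp : String) (buf : List Char) : List Char → Bool
  | [] => PySem.Set.contains owned cp
  | ch :: rest =>
    if ch == '/' && PySem.Set.contains owned (String.ofList buf) then true
    else pvBLoop owned cp (buf ++ [ch]) rest

def pvBHits (owned : PySem.Set String) (cp : String) : Bool :=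
  pvBLoop owned cp [] cp.toList

def matched_changed_paths_alt (owned_paths : List String) (changed_paths : List String) : List String :=
  let owned := PySem.Set.ofList owned_paths
  PySem.List.sorted (PySem.Set.ofList (changed_paths.filter (fun cp => pvBHits owned cp))) (fun x => x) false

-- ===== PRECONDITION & SPEC =====
def Spec_matched_changed_paths (owned_paths : List String) (changed_paths : List String) (out : List String) : Prop := out = matched_changed_paths_alt owned_paths changed_paths
instance (owned_paths : List String) (changed_paths : List String) (out : List String) : Decidable (Spec_matched_changed_paths owned_paths changed_paths out) := by unfold Spec_matched_changed_paths; infer_instance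

-- ===== CLAIM (what is proved, stated in full; the proofs are below) =====
def Claim_equal_matched_changed_paths : Prop := ∀ (owned_paths : List String) (changed_paths : List String), Dom_matched_changed_paths owned_paths changed_paths → Spec_matched_changed_paths owned_paths changed_paths (matched_changed_paths owned_paths changed_paths)

-- ===== LEMMAS AND PROOFS =====

-- A's inner loop succeeds iff some owned path equals cp or is a '/'-boundary prefix of cp
theorem pvAInner_iff (cp : String) (owned : List String) :
    pvAInner cp owned = true ↔
      ∃ op ∈ owned, cp = op ∨ ∃ rest, cp.toList = op.toList ++ '/' :: rest := by
  induction owned with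
  | nil => simp [pvAInner]
  | cons op rest ih =>
    simp only [pvAInner]
    split
    · rename_i h
      simp only [Bool.or_eq_true, beq_iff_eq, PySem.Str.startswith_eq] at h
      constructor
      · intro _
        refine ⟨op, List.mem_cons_self, ?_⟩
        rcases h with h | h
        · exact Or.inl h
        · rw [PySem.Chars.startswith_iff] at h
          rcases h with ⟨tail, htail⟩
          exact Or.inr ⟨tail, by simpa using htail.symm⟩
      · intro _; rfl
    · rename_i h
      simp only [Bool.or_eq_true, beq_iff_eq, PySem.Str.startswith_eq] at h
      push Not at h
      rw [ih]
      constructor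
      · rintro ⟨x, hx, hm⟩; exact ⟨x, List.mem_cons_of_mem _ hx, hm⟩
      · rintro ⟨x, hx, hm⟩
        rcases List.mem_cons.mp hx with rfl | hx'
        · exfalso
          rcases hm with rfl | ⟨r, hr⟩
          · exact h.1 rfl
          · have : PySem.Chars.startswith cp.toList (x ++ "/").toList = true := by
              rw [PySem.Chars.startswith_iff]
              exact ⟨r, by simpa using hr.symm⟩
            exact absurd this (by simpa using h.2)
        · exact ⟨x, hx', hm⟩

-- B's char walk: true iff cp itself is owned, or the accumulated prefix extended to
-- some '/' in the remaining chars is owned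
theorem pvBLoop_iff (owned : PySem.Set String) (cp : String) (buf : List Char) (cs : List Char) :
    pvBLoop owned cp buf cs = true ↔
      PySem.Set.contains owned cp = true ∨
        ∃ p q, cs = p ++ '/' :: q ∧ PySem.Set.contains owned (String.ofList (buf ++ p)) = true := by
  induction cs generalizing buf with
  | nil =>
    simp only [pvBLoop]
    constructor
    · intro h; exact Or.inl h
    · rintro (h | ⟨p, q, hpq, _⟩)
      · exact h
      · exact absurd hpq (by simp)
  | cons c rest ih =>
    simp only [pvBLoop]
    split
    · rename_i h
      simp only [Bool.and_eq_true, beq_iff_eq] at h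
      constructor
      · intro _
        exact Or.inr ⟨[], rest, by simp [h.1], by simpa using h.2⟩
      · intro _; rfl
    · rename_i h
      rw [ih]
      constructor
      · rintro (hc | ⟨p, q, hpq, hm⟩)
        · exact Or.inl hc
        · exact Or.inr ⟨c :: p, q, by simp [hpq], by simpa using hm⟩
      · rintro (hc | ⟨p, q, hpq, hm⟩)
        · exact Or.inl hc
        · cases p with
          | nil =>
            exfalso
            simp only [List.nil_append, List.cons.injEq] at hpq
            apply h
            simp only [Bool.and_eq_true, beq_iff_eq]
            exact ⟨hpq.1, by simpa using hm⟩
          | cons c' p' =>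
            simp only [List.cons_append, List.cons.injEq] at hpq
            obtain ⟨rfl, hrest⟩ := hpq
            exact Or.inr ⟨p', q, hrest, by simpa using hm⟩

-- per-changed-path: A's loop and B's walk agree
theorem hits_agree (owned : List String) (cp : String) :
    pvAInner cp owned = pvBHits (PySem.Set.ofList owned) cp := by
  have hmem : ∀ s : String, PySem.Set.contains (PySem.Set.ofList owned) s = true ↔ s ∈ owned := by
    intro s
    rw [PySem.Set.contains_iff, PySem.Set.mem_ofList]
  rw [Bool.eq_iff_iff, pvAInner_iff]
  unfold pvBHits
  rw [pvBLoop_iff]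
  constructor
  · rintro ⟨op, hop, rfl | ⟨rest, hrest⟩⟩
    · exact Or.inl ((hmem cp).mpr hop)
    · refine Or.inr ⟨op.toList, rest, by simpa using hrest, ?_⟩
      rw [hmem]
      simpa [String.ofList_toList] using hop
  · rintro (hc | ⟨p, q, hpq, hm⟩)
    · exact ⟨cp, (hmem cp).mp hc, Or.inl rfl⟩
    · refine ⟨String.ofList p, (hmem _).mp (by simpa using hm), Or.inr ⟨q, ?_⟩⟩
      simpa [String.toList_ofList] using hpq

-- A's foldl-append loop builds exactly the filter
theorem foldl_matches_eq_filter (owned : List String) (cps : List String) (acc : List String) :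
    cps.foldl (fun acc cp => if pvAInner cp owned then acc ++ [cp] else acc) acc
      = acc ++ cps.filter (fun cp => pvAInner cp owned) := by
  induction cps generalizing acc with
  | nil => simp
  | cons c rest ih =>
    simp only [List.foldl_cons, List.filter_cons]
    split <;> rename_i h <;> simp [h] at * <;> simp [ih]

-- ===== VERDICT (by name: the statement is the Claim_ definition above) =====
theorem matched_changed_paths_spec : Claim_equal_matched_changed_paths := by
  intro owned_paths changed_paths _
  unfold Spec_matched_changed_paths matched_changed_paths matched_changed_paths_alt
  rw [foldl_matches_eq_filter]
  have : (changed_paths.filter (fun cp => pvAInner cp owned_paths))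
      = changed_paths.filter (fun cp => pvBHits (PySem.Set.ofList owned_paths) cp) := by
    apply List.filter_congr
    intro x _
    exact hits_agree owned_paths x
  simp [this]
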